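-- pv_equiv track=rewrite | github.com/myjniak/ctr_time_trials | lib/grand_prix.py | calc_point_system
-- ===== SOURCE A (Python) =====
-- def calc_point_system(player_count):
--     point_system = list()
--     for i in range(player_count):
--         if i <= 2:
--             point_system.append(i)
--         else:
--             point_system.append(point_system[i - 1] + i - 1)
--     point_system.reverse()
--     return point_system
-- ===== SOURCE B (Python) =====
-- def calc_point_system(player_count):
--     def value(i):
--         return 0 if i == 0 else 1 + (i - 1) * i // 2
--     return [value(i) for i in range(player_count - 1, -1, -1)]
-- ===== Notes on version B (the rewrite author's own statement) =====
-- stated objective: alternative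
-- what changed: Replaces the accumulating loop (each entry built from the previous list element) plus a final in-place reverse by a closed-form triangular-number formula mapped over a descending range, so every element is computed independently with no running accumulator.
import Mathlib
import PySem

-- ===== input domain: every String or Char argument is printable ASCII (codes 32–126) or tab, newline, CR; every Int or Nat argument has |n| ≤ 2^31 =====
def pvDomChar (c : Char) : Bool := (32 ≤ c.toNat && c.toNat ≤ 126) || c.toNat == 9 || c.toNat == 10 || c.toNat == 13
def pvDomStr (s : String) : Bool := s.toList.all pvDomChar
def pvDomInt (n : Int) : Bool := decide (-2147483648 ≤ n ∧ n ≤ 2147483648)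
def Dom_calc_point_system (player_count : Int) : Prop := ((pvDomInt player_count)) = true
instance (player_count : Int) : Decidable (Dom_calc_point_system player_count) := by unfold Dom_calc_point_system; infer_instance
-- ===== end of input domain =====

-- ===== PORT A =====
-- literal port of A: fold over range(player_count); point_system[i-1] is always
-- in range when read (i ≥ 3, list has length i), so pyGetD's default is never used
def calc_point_system (player_count : Int) : List Int :=
  ((PySem.List.pyRange 0 player_count 1).foldl
    (fun ps i =>
      if i ≤ 2 then ps ++ [i]
      else ps ++ [PySem.List.pyGetD ps (i - 1) 0 + i - 1]) []).reverse

-- ===== PORT B =====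
-- B: closed form, mapped over the descending range
def pvValue (i : Int) : Int :=
  if i = 0 then 0 else 1 + PySem.Int.floordiv ((i - 1) * i) 2

def calc_point_system_alt (player_count : Int) : List Int :=
  (PySem.List.pyRange (player_count - 1) (-1) (-1)).map pvValue

-- ===== PRECONDITION & SPEC =====
def Spec_calc_point_system (player_count : Int) (out : List Int) : Prop := out = calc_point_system_alt player_count
instance (player_count : Int) (out : List Int) : Decidable (Spec_calc_point_system player_count out) := by unfold Spec_calc_point_system; infer_instance

-- ===== CLAIM (what is proved, stated in full; the proofs are below) =====
def Claim_equal_calc_point_system : Prop := ∀ (player_count : Int), Dom_calc_point_system player_count → Spec_calc_point_system player_count (calc_point_system player_count)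

-- ===== LEMMAS AND PROOFS =====

theorem pvValue_step (i : Int) (h : 2 ≤ i) : pvValue i = pvValue (i - 1) + i - 1 := by
  obtain ⟨t, ht⟩ : ∃ t, (i - 1) * i = 2 * t := by
    rcases Int.even_mul_succ_self (i - 1) with ⟨t, ht⟩
    exact ⟨t, by rw [show i - 1 + 1 = i by ring] at ht; omega⟩
  obtain ⟨s, hs⟩ : ∃ s, (i - 1 - 1) * (i - 1) = 2 * s := by
    rcases Int.even_mul_succ_self (i - 1 - 1) with ⟨s, hs⟩
    exact ⟨s, by rw [show i - 1 - 1 + 1 = i - 1 by ring] at hs; omega⟩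
  simp only [pvValue, PySem.Int.floordiv, ht, hs]
  rw [Int.mul_fdiv_cancel_left _ (by norm_num), Int.mul_fdiv_cancel_left _ (by norm_num),
    if_neg (by omega), if_neg (by omega)]
  have hts : 2 * t - 2 * s = 2 * (i - 1) := by rw [← ht, ← hs]; ring
  omega

theorem pv_loop_eq (n : Nat) :
    (PySem.List.pyRange 0 (n : Int) 1).foldl
      (fun ps i =>
        if i ≤ 2 then ps ++ [i]
        else ps ++ [PySem.List.pyGetD ps (i - 1) 0 + i - 1]) []
      = (PySem.List.pyRange 0 (n : Int) 1).map pvValue := by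
  induction n with
  | zero => simp [PySem.List.pyRange_one_eq_nil]
  | succ n ih =>
    have hsplit : PySem.List.pyRange 0 ((n : Int) + 1) 1
        = PySem.List.pyRange 0 (n : Int) 1 ++ [(n : Int)] :=
      PySem.List.pyRange_one_succ_right (by positivity)
    push_cast
    rw [hsplit, List.foldl_append, List.map_append, ih]
    simp only [List.foldl_cons, List.foldl_nil, List.map_cons, List.map_nil]
    rcases le_or_gt (n : Int) 2 with hle | hgt
    · rw [if_pos hle]
      have hn : n ≤ 2 := by exact_mod_cast hle
      interval_cases n <;> decide
    · rw [if_neg (by omega)]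
      have hget : PySem.List.pyGetD ((PySem.List.pyRange 0 (n : Int) 1).map pvValue) ((n : Int) - 1) 0
          = pvValue ((n : Int) - 1) :=
        PySem.List.pyGetD_map_pyRange_of_nonneg pvValue (n : Int) ((n : Int) - 1) 0 (by omega) (by omega)
      rw [hget, ← pvValue_step (n : Int) (by omega)]

-- ===== VERDICT (by name: the statement is the Claim_ definition above) =====
theorem calc_point_system_spec : Claim_equal_calc_point_system := by
  intro p _
  unfold Spec_calc_point_system calc_point_system calc_point_system_alt
  have hrev : PySem.List.pyRange (p - 1) (-1) (-1)
      = (PySem.List.pyRange 0 p 1).reverse := by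
    rw [PySem.List.pyRange_neg_one_eq_reverse]
    norm_num
  rw [hrev, List.map_reverse]
  rcases le_or_gt p 0 with hle | hgt
  · rw [PySem.List.pyRange_one_eq_nil hle]; rfl
  · have hp : p = (p.toNat : Int) := by omega
    rw [hp, pv_loop_eq]
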